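-- pv_equiv track=rewrite | github.com/pwgraham91/Python-Exercises | insert_ads/exercise.py | evenly_ad_ads
-- ===== SOURCE A (Python) =====
-- def evenly_ad_ads(content_with_ads, content_without_ads, start_ad_index, ad_interval):
--     # add one to make it so ads go after the interval instead of on the interval
--     ad_interval = ad_interval + 1
--
--     content_length = len(content_without_ads)
--     content_counter = 0
--
--     # iterate through the list and add either an AD or content until there is no more content to add
--     while content_counter < content_length:
--         content_with_ads_size = len(content_with_ads)
--         if content_with_ads_size == start_ad_index or (content_with_ads_size - start_ad_index) % ad_interval == 0:
--             content_with_ads.append("AD!")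
--         else:
--             content_with_ads.append(content_without_ads[content_counter])
--             content_counter += 1
--
--     return content_with_ads
-- ===== SOURCE B (Python) =====
-- def evenly_ad_ads(content_with_ads, content_without_ads, start_ad_index, ad_interval):
--     # closed-form chunking: ads land exactly at positions congruent to
--     # start_ad_index modulo |ad_interval + 1|; compute the offset of the first
--     # ad arithmetically and splice the content in slices, no per-position test
--     if not content_without_ads:
--         return content_with_ads
--     m = abs(ad_interval + 1)
--     d = (start_ad_index - len(content_with_ads)) % m
--     head, rest = content_without_ads[:d], content_without_ads[d:]
--     content_with_ads.extend(head)
--     while rest: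
--         content_with_ads.append("AD!")
--         content_with_ads.extend(rest[:m - 1])
--         rest = rest[m - 1:]
--     return content_with_ads
-- ===== Notes on version B (the rewrite author's own statement) =====
-- stated objective: alternative
-- what changed: A tests an ad-due condition at every output position in one branch-per-position loop; B computes the offset of the first ad in closed form as (start_ad_index - len(content_with_ads)) % |ad_interval+1| and then splices the content in bulk slices between ad markers, never evaluating a per-position condition.
import Mathlib
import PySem

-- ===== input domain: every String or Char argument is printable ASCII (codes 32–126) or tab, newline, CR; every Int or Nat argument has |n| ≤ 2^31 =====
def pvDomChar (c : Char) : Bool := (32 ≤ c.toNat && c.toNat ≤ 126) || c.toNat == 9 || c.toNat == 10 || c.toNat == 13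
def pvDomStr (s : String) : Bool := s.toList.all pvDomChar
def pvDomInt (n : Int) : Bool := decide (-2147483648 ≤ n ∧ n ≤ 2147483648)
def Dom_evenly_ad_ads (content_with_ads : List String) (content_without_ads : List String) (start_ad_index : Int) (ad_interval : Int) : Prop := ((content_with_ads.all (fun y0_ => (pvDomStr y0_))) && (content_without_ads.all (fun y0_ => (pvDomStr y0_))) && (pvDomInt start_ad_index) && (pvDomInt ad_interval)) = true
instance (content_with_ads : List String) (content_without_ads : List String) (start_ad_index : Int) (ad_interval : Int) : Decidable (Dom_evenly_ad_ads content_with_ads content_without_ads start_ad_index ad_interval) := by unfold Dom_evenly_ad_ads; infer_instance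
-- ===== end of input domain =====

-- B replaces A's branch-per-position loop with closed-form modular arithmetic: the offset
-- of the first ad is (start_ad_index - len) % |ad_interval+1| and the content is spliced in
-- fixed-size slices between ad markers (objective: alternative). Both Pythons mutate
-- content_with_ads in place identically; the equivalence proved here is about the return value.

-- ===== PORT A =====
-- A's while loop: state = the accumulated list (its length is the position) and the
-- remaining content; fuel makes the recursion total (2 per item suffices inside Pre_).
def evenlyLoopA (fuel : Nat) (acc : List String) (rest : List String) (s k : Int) : List String :=
  match fuel, rest with
  | 0, _ => acc
  | _ + 1, [] => acc
  | f + 1, x :: xs =>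
    let size : Int := acc.length
    if size = s ∨ PySem.Int.mod (size - s) k = 0 then
      evenlyLoopA f (acc ++ ["AD!"]) (x :: xs) s k
    else
      evenlyLoopA f (acc ++ [x]) xs s k

def evenly_ad_ads (content_with_ads : List String) (content_without_ads : List String) (start_ad_index : Int) (ad_interval : Int) : List String :=
  evenlyLoopA (2 * content_without_ads.length + 2) content_with_ads content_without_ads start_ad_index (ad_interval + 1)

-- ===== PORT B =====
-- B's `while rest:` loop: append "AD!", splice the next m-1 items, drop them from rest.
def chunkB (m : Int) : Nat → List String → List String → List String
  | _, acc, [] => acc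
  | 0, acc, _ => acc
  | f + 1, acc, x :: xs =>
      chunkB m f (acc ++ ["AD!"] ++ PySem.List.slice (x :: xs) none (some (m - 1)))
        (PySem.List.slice (x :: xs) (some (m - 1)) none)

def evenly_ad_ads_alt (content_with_ads : List String) (content_without_ads : List String) (start_ad_index : Int) (ad_interval : Int) : List String :=
  if content_without_ads = [] then content_with_ads
  else
    let m : Int := |ad_interval + 1|
    let d : Int := PySem.Int.mod (start_ad_index - (content_with_ads.length : Int)) m
    let head := PySem.List.slice content_without_ads none (some d)
    let rest := PySem.List.slice content_without_ads (some d) none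
    chunkB m content_without_ads.length (content_with_ads ++ head) rest

-- ===== PRECONDITION & SPEC =====
-- Pre_ excludes nonempty content with ad_interval ∈ {-1, 0, -2}, on which A never returns:
-- with ad_interval = -1 the divisor ad_interval+1 is 0 and Python raises ZeroDivisionError;
-- with ad_interval = 0 or -2 the divisor is ±1, the ad condition is always true and the
-- loop appends "AD!" forever.
def Pre_evenly_ad_ads (content_with_ads : List String) (content_without_ads : List String) (start_ad_index : Int) (ad_interval : Int) : Prop :=
  content_without_ads = [] ∨ (1 ≤ ad_interval ∨ ad_interval ≤ -3)
instance (content_with_ads : List String) (content_without_ads : List String) (start_ad_index : Int) (ad_interval : Int) : Decidable (Pre_evenly_ad_ads content_with_ads content_without_ads start_ad_index ad_interval) := by unfold Pre_evenly_ad_ads; infer_instance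

def pvWitness_evenly_ad_ads : List String × List String × Int × Int := (["x"], ["a", "b", "c"], 1, 1)

def Spec_evenly_ad_ads (content_with_ads : List String) (content_without_ads : List String) (start_ad_index : Int) (ad_interval : Int) (out : List String) : Prop := out = evenly_ad_ads_alt content_with_ads content_without_ads start_ad_index ad_interval
instance (content_with_ads : List String) (content_without_ads : List String) (start_ad_index : Int) (ad_interval : Int) (out : List String) : Decidable (Spec_evenly_ad_ads content_with_ads content_without_ads start_ad_index ad_interval out) := by unfold Spec_evenly_ad_ads; infer_instance

-- ===== CLAIM (what is proved, stated in full; the proofs are below) =====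
def Claim_equal_evenly_ad_ads : Prop := ∀ (content_with_ads : List String) (content_without_ads : List String) (start_ad_index : Int) (ad_interval : Int), Dom_evenly_ad_ads content_with_ads content_without_ads start_ad_index ad_interval → Pre_evenly_ad_ads content_with_ads content_without_ads start_ad_index ad_interval → Spec_evenly_ad_ads content_with_ads content_without_ads start_ad_index ad_interval (evenly_ad_ads content_with_ads content_without_ads start_ad_index ad_interval)

-- ===== LEMMAS AND PROOFS =====

-- The common emitted sequence, parameterised by the current position (A's shape).
def emitAds (s k : Int) : Int → List String → List String
  | _, [] => []
  | pos, x :: xs =>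
    if pos = s ∨ PySem.Int.mod (pos - s) k = 0 then
      "AD!" :: x :: emitAds s k (pos + 2) xs
    else
      x :: emitAds s k (pos + 1) xs

-- The same sequence parameterised by the distance to the next ad (B's shape).
def emit2 (m : Int) : Int → List String → List String
  | _, [] => []
  | d, x :: xs =>
    if d = 0 then "AD!" :: x :: emit2 m (m - 2) xs else x :: emit2 m (d - 1) xs

lemma no_cond_succ {p s k : Int} (hk : 1 ≤ k ∨ k ≤ -2)
    (h : p = s ∨ PySem.Int.mod (p - s) k = 0) (hk2 : k ≠ 1) :
    ¬ (p + 1 = s ∨ PySem.Int.mod (p + 1 - s) k = 0) := by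
  intro h2
  rw [PySem.Int.mod_eq_zero_iff_dvd] at h h2
  have h' : k ∣ p - s := by
    rcases h with h | h
    · simp [h]
    · exact h
  have h2' : k ∣ p + 1 - s := by
    rcases h2 with h2 | h2
    · rw [h2]; simp
    · exact h2
  have hone : k ∣ 1 := by have := dvd_sub h2' h'; simpa using this
  have := Int.isUnit_iff.mp (isUnit_of_dvd_one hone)
  omega

lemma loopA_emit {s k : Int} (hk : (2 ≤ k ∨ k ≤ -2)) :
    ∀ (xs acc : List String) (fuel : Nat), 2 * xs.length ≤ fuel →
      evenlyLoopA fuel acc xs s k = acc ++ emitAds s k (acc.length) xs := by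
  intro xs
  induction xs with
  | nil =>
    intro acc fuel _
    cases fuel <;> simp [evenlyLoopA, emitAds]
  | cons x xs ih =>
    intro acc fuel hfuel
    simp only [List.length_cons] at hfuel
    obtain ⟨g, rfl⟩ : ∃ g, fuel = g + 2 := ⟨fuel - 2, by omega⟩
    by_cases hc : ((acc.length : Int) = s ∨ PySem.Int.mod ((acc.length : Int) - s) k = 0)
    · have hnc := no_cond_succ (p := (acc.length : Int)) (by omega) hc (by omega)
      have hnc' : ¬ (((acc ++ ["AD!"]).length : Int) = s ∨
          PySem.Int.mod (((acc ++ ["AD!"]).length : Int) - s) k = 0) := by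
        simpa [List.length_append, add_comm] using hnc
      rw [show g + 2 = (g + 1) + 1 from rfl]
      simp only [evenlyLoopA, if_pos hc, if_neg hnc']
      rw [ih (acc ++ ["AD!"] ++ [x]) g (by omega)]
      simp [emitAds, if_pos hc, List.length_append]
    · rw [show g + 2 = (g + 1) + 1 from rfl]
      simp only [evenlyLoopA, if_neg hc]
      rw [ih (acc ++ [x]) (g + 1) (by omega)]
      simp [emitAds, if_neg hc, List.length_append]

lemma cond_iff_mod0 {s k pos : Int} :
    (pos = s ∨ PySem.Int.mod (pos - s) k = 0) ↔ PySem.Int.mod (s - pos) |k| = 0 := by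
  rw [PySem.Int.mod_eq_zero_iff_dvd, PySem.Int.mod_eq_zero_iff_dvd, abs_dvd]
  constructor
  · rintro (h | h)
    · simp [h]
    · have : s - pos = -(pos - s) := by ring
      rw [this]; exact h.neg_right
  · intro h
    have : pos - s = -(s - pos) := by ring
    exact Or.inr (this ▸ h.neg_right)

lemma emod_sub_two {m t : Int} (hm : 2 ≤ m) (h : m ∣ t) : (t - 2) % m = m - 2 := by
  obtain ⟨c, rfl⟩ := h
  calc (m * c - 2) % m = (-2 + m * c) % m := by ring_nf
    _ = (-2) % m := by rw [Int.add_mul_emod_self_left]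
    _ = ((m - 2) + m * (-1)) % m := by ring_nf
    _ = (m - 2) % m := by rw [Int.add_mul_emod_self_left]
    _ = m - 2 := Int.emod_eq_of_lt (by omega) (by omega)

lemma emod_sub_one {m t d : Int} (hm : 2 ≤ m) (h : t % m = d) (hd : d ≠ 0) :
    (t - 1) % m = d - 1 := by
  have h0 : 0 ≤ d := h ▸ Int.emod_nonneg t (by omega)
  have h1 : d < m := h ▸ Int.emod_lt_of_pos t (by omega)
  have ht : t - 1 = (d - 1) + m * (t / m) := by
    have := Int.ediv_add_emod t m; omega
  rw [ht, Int.add_mul_emod_self_left]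
  exact Int.emod_eq_of_lt (by omega) (by omega)

lemma emitAds_eq_emit2 {s k : Int} (hm : 2 ≤ |k|) :
    ∀ (xs : List String) (pos : Int),
      emitAds s k pos xs = emit2 |k| (PySem.Int.mod (s - pos) |k|) xs := by
  intro xs
  induction xs with
  | nil => intro pos; simp [emitAds, emit2]
  | cons x xs ih =>
    intro pos
    have hmp : (0:Int) < |k| := by omega
    have hmod : PySem.Int.mod (s - pos) |k| = (s - pos) % |k| :=
      PySem.Int.mod_eq_emod_of_pos hmp
    by_cases hc : (pos = s ∨ PySem.Int.mod (pos - s) k = 0)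
    · have h0 : PySem.Int.mod (s - pos) |k| = 0 := cond_iff_mod0.mp hc
      have hdvd : |k| ∣ s - pos := by
        rw [PySem.Int.mod_eq_zero_iff_dvd] at h0; exact h0
      have h2 : PySem.Int.mod (s - (pos + 2)) |k| = |k| - 2 := by
        rw [PySem.Int.mod_eq_emod_of_pos hmp, show s - (pos + 2) = (s - pos) - 2 by ring]
        exact emod_sub_two hm hdvd
      simp only [emitAds, emit2, if_pos hc, h0, ih, h2]
      simp
    · have h0 : PySem.Int.mod (s - pos) |k| ≠ 0 := fun h => hc (cond_iff_mod0.mpr h)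
      have h1 : PySem.Int.mod (s - (pos + 1)) |k| = PySem.Int.mod (s - pos) |k| - 1 := by
        rw [PySem.Int.mod_eq_emod_of_pos hmp, show s - (pos + 1) = (s - pos) - 1 by ring]
        exact emod_sub_one hm (hmod.symm) (fun h => h0 (hmod ▸ h))
      simp only [emitAds, emit2, if_neg hc, if_neg h0, ih, h1]

lemma emit2_shift {m : Int} (hm : 2 ≤ m) :
    ∀ (xs : List String) (d : Int), 0 ≤ d →
      emit2 m d xs = xs.take d.toNat ++ emit2 m 0 (xs.drop d.toNat) := by
  intro xs
  induction xs with
  | nil => intro d _; simp [emit2]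
  | cons x xs ih =>
    intro d hd
    by_cases h0 : d = 0
    · subst h0; simp
    · have hdn : d.toNat = (d - 1).toNat + 1 := by omega
      simp only [emit2, if_neg h0, hdn, List.take_succ_cons, List.drop_succ_cons]
      rw [ih (d - 1) (by omega)]
      simp

lemma chunkB_emit {m : Int} (hm : 2 ≤ m) :
    ∀ (fuel : Nat) (xs acc : List String), xs.length ≤ fuel →
      chunkB m fuel acc xs = acc ++ emit2 m 0 xs := by
  intro fuel
  induction fuel with
  | zero =>
    intro xs acc h
    cases xs with
    | nil => simp [chunkB, emit2]
    | cons x l => simp at h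
  | succ f ih =>
    intro xs acc h
    cases xs with
    | nil => simp [chunkB, emit2]
    | cons x l =>
      have h1 : (m - 1).toNat = (m - 2).toNat + 1 := by omega
      have hsl1 : PySem.List.slice (x :: l) none (some (m - 1)) = x :: l.take (m - 2).toNat := by
        rw [PySem.List.slice_to _ (by omega : (0:Int) ≤ m - 1), h1, List.take_succ_cons]
      have hsl2 : PySem.List.slice (x :: l) (some (m - 1)) none = l.drop (m - 2).toNat := by
        rw [PySem.List.slice_from _ (by omega : (0:Int) ≤ m - 1), h1, List.drop_succ_cons]
      simp only [chunkB, hsl1, hsl2]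
      rw [ih (l.drop (m - 2).toNat) _ (by simp only [List.length_drop]; simp at h; omega)]
      simp only [emit2]
      rw [emit2_shift hm l (m - 2) (by omega)]
      simp

-- ===== VERDICT (by name: the statement is the Claim_ definition above) =====
theorem evenly_ad_ads_spec : Claim_equal_evenly_ad_ads := by
  intro cwa cwo s ai _ hpre
  unfold Spec_evenly_ad_ads evenly_ad_ads evenly_ad_ads_alt
  by_cases hnil : cwo = []
  · subst hnil
    simp [evenlyLoopA]
  · rw [if_neg hnil]
    dsimp only
    have hk : (2 ≤ ai + 1 ∨ ai + 1 ≤ -2) := by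
      rcases hpre with h | h
      · exact absurd h hnil
      · omega
    have hm : (2:Int) ≤ |ai + 1| := by
      rcases hk with h | h
      · rw [abs_of_pos (by omega)]; omega
      · rw [abs_of_neg (by omega)]; omega
    have hd0 : (0:Int) ≤ PySem.Int.mod (s - (cwa.length : Int)) |ai + 1| :=
      PySem.Int.mod_nonneg _ (by omega)
    rw [loopA_emit hk cwo cwa _ (by omega),
        emitAds_eq_emit2 hm cwo (cwa.length : Int)]
    rw [PySem.List.slice_to _ hd0, PySem.List.slice_from _ hd0]
    rw [chunkB_emit hm cwo.length _ _ (by simp [List.length_drop])]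
    rw [emit2_shift hm cwo _ hd0]
    simp
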